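-- pv_equiv track=rewrite | github.com/spriteboysz/LeetcodePython | LCP/LCP 66. 最小展台数量.py | minNumBooths
-- ===== SOURCE A (Python) =====
-- from typing import List
--
-- def minNumBooths(demand: List[str]) -> int:
--     alphabet = [0] * 26
--     for word in demand:
--         cur = [0] * 26
--         for c in word:
--             cur[ord(c) - 97] += 1
--         for i in range(26):
--             alphabet[i] = max(alphabet[i], cur[i])
--     return sum(alphabet)
-- ===== SOURCE B (Python) =====
-- from typing import List
--
-- def minNumBooths(demand: List[str]) -> int:
--     # Divide and conquer: the booth table of a list of words is the pointwise
--     # max of the booth tables of its two halves; merge recursively.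
--     if not demand:
--         return 0
--     return sum(_maxTable(demand))
--
-- def _maxTable(words):
--     if len(words) == 1:
--         cur = [0] * 26
--         for c in words[0]:
--             cur[ord(c) - 97] += 1
--         return cur
--     mid = len(words) // 2
--     left = _maxTable(words[:mid])
--     right = _maxTable(words[mid:])
--     return [max(x, y) for x, y in zip(left, right)]
-- ===== Notes on version B (the rewrite author's own statement) =====
-- stated objective: alternative
-- what changed: A folds the words left-to-right into one running 26-slot max accumulator and sums it; B is divide-and-conquer: it recursively splits the word list in halves, computes each half's booth table and merges them by pointwise max, summing the merged table (correct because pointwise max is associative).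
import Mathlib
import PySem

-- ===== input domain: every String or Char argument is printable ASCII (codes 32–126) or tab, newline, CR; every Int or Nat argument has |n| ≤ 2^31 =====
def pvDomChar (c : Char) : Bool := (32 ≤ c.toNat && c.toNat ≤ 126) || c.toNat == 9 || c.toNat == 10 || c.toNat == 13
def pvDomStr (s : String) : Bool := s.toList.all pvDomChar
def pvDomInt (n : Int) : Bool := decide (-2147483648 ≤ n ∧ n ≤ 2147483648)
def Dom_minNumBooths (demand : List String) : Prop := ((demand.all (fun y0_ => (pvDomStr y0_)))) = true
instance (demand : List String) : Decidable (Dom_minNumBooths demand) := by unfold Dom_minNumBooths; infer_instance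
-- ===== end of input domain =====

-- B replaces A's left-to-right running-max fold with a divide-and-conquer merge
-- (recursive halving, pointwise-max merge) — same cost; equivalence is on the return value.

-- ===== PORT A =====
-- shared per-word counting loop: 'cur = [0]*26; for c in word: cur[ord(c)-97] += 1'
-- (identical source text in A and in B's leaf case; pySetD/pyGetD give Python's negative-index wrap)
def pvCountWord (cs : List Char) : List Int :=
  cs.foldl
    (fun cur c =>
      PySem.List.pySetD cur ((c.toNat : Int) - 97)
        (PySem.List.pyGetD cur ((c.toNat : Int) - 97) 0 + 1))
    (List.replicate 26 0)

def minNumBooths (demand : List String) : Int :=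
  let alphabet := demand.foldl
    (fun alphabet word =>
      let cur := pvCountWord word.toList
      (PySem.List.pyRange 0 26 1).foldl
        (fun a i =>
          PySem.List.pySetD a i
            (max (PySem.List.pyGetD a i 0) (PySem.List.pyGetD cur i 0)))
        alphabet)
    (List.replicate 26 0)
  alphabet.sum

-- ===== PORT B =====
-- _maxTable: booth table of a nonempty word list, by recursive halving.
-- words[:mid] / words[mid:] with 0 ≤ mid ≤ len are exactly take/drop
-- (PySem.List.slice_to_natCast / slice_from_natCast); the [] case is unreachable
-- in B (never called on an empty list) and returns a junk value.
def pvMaxTable : List String → List Int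
  | [] => []
  | [w] => pvCountWord w.toList
  | a :: b :: rest =>
    List.zipWith max
      (pvMaxTable ((a :: b :: rest).take ((a :: b :: rest).length / 2)))
      (pvMaxTable ((a :: b :: rest).drop ((a :: b :: rest).length / 2)))
termination_by l => l.length
decreasing_by
  · simp; omega
  · simp; omega

def minNumBooths_alt (demand : List String) : Int :=
  if demand = [] then 0 else (pvMaxTable demand).sum

-- ===== PRECONDITION & SPEC =====
-- Pre_ excludes exactly the inputs on which A raises IndexError: a character whose
-- code is outside [71,122] makes ord(c)-97 fall outside [-26,25], out of range for
-- the 26-slot list.  (B raises there too.)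
def Pre_minNumBooths (demand : List String) : Prop :=
  (demand.all (fun s => s.toList.all (fun c => 71 ≤ c.toNat && c.toNat ≤ 122))) = true
instance (demand : List String) : Decidable (Pre_minNumBooths demand) := by
  unfold Pre_minNumBooths; infer_instance

def pvWitness_minNumBooths : List String := ["abc", "Gb"]

def Spec_minNumBooths (demand : List String) (out : Int) : Prop := out = minNumBooths_alt demand
instance (demand : List String) (out : Int) : Decidable (Spec_minNumBooths demand out) := by unfold Spec_minNumBooths; infer_instance

-- ===== CLAIM (what is proved, stated in full; the proofs are below) =====
def Claim_equal_minNumBooths : Prop := ∀ (demand : List String), Dom_minNumBooths demand → Pre_minNumBooths demand → Spec_minNumBooths demand (minNumBooths demand)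

-- ===== LEMMAS AND PROOFS =====

-- proof-only helper: running pointwise max of the per-word tables
def pvM (demand : List String) : List Int :=
  demand.foldl (fun a w => List.zipWith max a (pvCountWord w.toList)) (List.replicate 26 0)

-- the counting loop preserves the list's length
theorem pvLen_foldl_count (cs : List Char) (a : List Int) :
    (cs.foldl (fun cur c =>
      PySem.List.pySetD cur ((c.toNat : Int) - 97)
        (PySem.List.pyGetD cur ((c.toNat : Int) - 97) 0 + 1)) a).length = a.length := by
  induction cs generalizing a with
  | nil => rfl
  | cons c cs ih => simp [List.foldl_cons, ih, PySem.List.length_pySetD]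

theorem pvCountWord_length (cs : List Char) : (pvCountWord cs).length = 26 := by
  unfold pvCountWord; rw [pvLen_foldl_count]; simp

-- A's inner 'for i in range(n)' slot-max loop is zipWith max on the first n slots
theorem pvFoldl_update (cur : List Int) : ∀ (n : Nat) (a : List Int),
    n ≤ a.length → n ≤ cur.length →
    (PySem.List.pyRange 0 (n : Int) 1).foldl
      (fun a i => PySem.List.pySetD a i
        (max (PySem.List.pyGetD a i 0) (PySem.List.pyGetD cur i 0))) a
    = List.zipWith max (a.take n) (cur.take n) ++ a.drop n := by
  intro n
  induction n with
  | zero => intro a _ _; simp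
  | succ n ih =>
    intro a h1 h2
    have hn1 : n < a.length := by omega
    have hn2 : n < cur.length := by omega
    have hcast : (((n+1 : Nat)) : Int) = (n : Int) + 1 := by push_cast; ring
    rw [hcast, PySem.List.pyRange_one_succ_right (by positivity), List.foldl_append,
        ih a (by omega) (by omega)]
    have hp : (List.zipWith max (a.take n) (cur.take n)).length = n := by
      simp; omega
    have hRa : PySem.List.pyGetD
        (List.zipWith max (a.take n) (cur.take n) ++ a.drop n) (n : Int) 0 = a[n] := by
      rw [PySem.List.pyGetD_natCast, List.getD,
          List.getElem?_append_right hp.le, hp, Nat.sub_self, List.getElem?_drop]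
      simp [List.getElem?_eq_getElem hn1]
    have hcurn : PySem.List.pyGetD cur (n : Int) 0 = cur[n] := by
      rw [PySem.List.pyGetD_natCast]
      simp [List.getD, List.getElem?_eq_getElem hn2]
    simp only [List.foldl_cons, List.foldl_nil]
    rw [hRa, hcurn, PySem.List.pySetD_natCast, List.set_append]
    rw [if_neg (by omega), hp]
    rw [List.drop_eq_getElem_cons hn1]
    simp only [Nat.sub_self, List.set_cons_zero]
    rw [List.take_succ_eq_append_getElem hn1, List.take_succ_eq_append_getElem hn2,
        List.zipWith_append (by simp; omega)]
    simp

theorem pvM_length (demand : List String) : (pvM demand).length = 26 := by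
  suffices h : ∀ (ws : List String) (a : List Int), a.length = 26 →
      (ws.foldl (fun a w => List.zipWith max a (pvCountWord w.toList)) a).length = 26 by
    exact h demand _ (by simp)
  intro ws
  induction ws with
  | nil => intro a ha; simpa using ha
  | cons w ws ih =>
    intro a ha
    exact ih _ (by simp [ha, pvCountWord_length])

-- A computes (pvM demand).sum
theorem pvA_eq (demand : List String) : minNumBooths demand = (pvM demand).sum := by
  unfold minNumBooths pvM
  suffices h : ∀ (ws : List String) (a : List Int), a.length = 26 →
      ws.foldl (fun alphabet word =>
        (PySem.List.pyRange 0 26 1).foldl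
          (fun a i => PySem.List.pySetD a i
            (max (PySem.List.pyGetD a i 0)
              (PySem.List.pyGetD (pvCountWord word.toList) i 0))) alphabet) a
      = ws.foldl (fun a w => List.zipWith max a (pvCountWord w.toList)) a by
    rw [h demand _ (by simp)]
  intro ws
  induction ws with
  | nil => intro a _; simp only [List.foldl_nil]
  | cons w ws ih =>
    intro a ha
    simp only [List.foldl_cons]
    have hr : PySem.List.pyRange 0 26 1 = PySem.List.pyRange 0 ((26 : Nat) : Int) 1 := by
      norm_num
    rw [hr, pvFoldl_update _ 26 a (by omega) (by rw [pvCountWord_length])]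
    rw [List.take_of_length_le (by omega), List.take_of_length_le (by rw [pvCountWord_length]),
        List.drop_of_length_le (by omega), List.append_nil]
    exact ih _ (by simp [ha, pvCountWord_length])

-- ---- B-side lemmas: divide-and-conquer merge equals the left fold ----

-- pyGetD with default 0 on a nonnegative list is nonnegative
theorem pvPyGetD_nonneg (a : List Int) (i : Int) (ha : ∀ x ∈ a, 0 ≤ x) :
    0 ≤ PySem.List.pyGetD a i 0 := by
  unfold PySem.List.pyGetD PySem.List.pyGet?
  cases h : PySem.List.pyIdx? a.length i with
  | none => simp
  | some k =>
    simp only [Option.bind_some]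
    cases hk : a[k]? with
    | none => simp
    | some y => simpa using ha y (List.mem_of_getElem? hk)

-- pySetD with a nonnegative value preserves nonnegativity
theorem pvPySetD_nonneg (a : List Int) (i v : Int) (ha : ∀ x ∈ a, 0 ≤ x) (hv : 0 ≤ v) :
    ∀ x ∈ PySem.List.pySetD a i v, 0 ≤ x := by
  unfold PySem.List.pySetD PySem.List.pySet?
  cases h : PySem.List.pyIdx? a.length i with
  | none => simpa [h] using ha
  | some k =>
    simp only [Option.map_some, Option.getD_some]
    intro x hx
    rcases List.mem_or_eq_of_mem_set hx with h1 | h1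
    · exact ha x h1
    · omega

-- the counting loop only produces nonnegative entries
theorem pvCountWord_nonneg (cs : List Char) : ∀ x ∈ pvCountWord cs, 0 ≤ x := by
  unfold pvCountWord
  suffices h : ∀ (l : List Char) (a : List Int), (∀ x ∈ a, 0 ≤ x) →
      ∀ x ∈ l.foldl (fun cur c =>
        PySem.List.pySetD cur ((c.toNat : Int) - 97)
          (PySem.List.pyGetD cur ((c.toNat : Int) - 97) 0 + 1)) a, 0 ≤ x by
    exact h cs _ (by intro x hx; simp at hx; omega)
  intro l
  induction l with
  | nil => intro a ha; simpa using ha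
  | cons c cs ih =>
    intro a ha
    apply ih
    intro x hx
    exact pvPySetD_nonneg a _ _ ha
      (by have := pvPyGetD_nonneg a ((c.toNat : Int) - 97) ha; omega) x hx

theorem pvZipmax_nonneg (a b : List Int) (ha : ∀ x ∈ a, 0 ≤ x) (hb : ∀ x ∈ b, 0 ≤ x) :
    ∀ x ∈ List.zipWith max a b, 0 ≤ x := by
  induction a generalizing b with
  | nil => simp
  | cons y ys ih =>
    cases b with
    | nil => simp
    | cons z zs =>
      intro x hx
      simp only [List.zipWith_cons_cons, List.mem_cons] at hx
      rcases hx with h | h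
      · have := ha y (by simp); have := hb z (by simp); subst h; simp; omega
      · exact ih zs (fun x hx => ha x (by simp [hx])) (fun x hx => hb x (by simp [hx])) x h

theorem pvZipmax_unit_left (t : List Int) (ht : ∀ x ∈ t, 0 ≤ x) :
    List.zipWith max (List.replicate t.length (0 : Int)) t = t := by
  induction t with
  | nil => rfl
  | cons y ys ih =>
    simp only [List.length_cons, List.replicate_succ, List.zipWith_cons_cons]
    rw [ih (fun x hx => ht x (by simp [hx])), max_eq_right (ht y (by simp))]

theorem pvZipmax_unit_right (t : List Int) (ht : ∀ x ∈ t, 0 ≤ x) :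
    List.zipWith max t (List.replicate t.length (0 : Int)) = t := by
  induction t with
  | nil => rfl
  | cons y ys ih =>
    simp only [List.length_cons, List.replicate_succ, List.zipWith_cons_cons]
    rw [ih (fun x hx => ht x (by simp [hx])), max_eq_left (ht y (by simp))]

theorem pvZipmax_assoc (a b c : List Int) :
    List.zipWith max (List.zipWith max a b) c = List.zipWith max a (List.zipWith max b c) := by
  induction a generalizing b c with
  | nil => simp
  | cons y ys ih =>
    cases b with
    | nil => simp
    | cons z zs =>
      cases c with
      | nil => simp
      | cons u us => simp [List.zipWith_cons_cons, ih, max_assoc]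

theorem pvM_nonneg (demand : List String) : ∀ x ∈ pvM demand, 0 ≤ x := by
  unfold pvM
  suffices h : ∀ (ws : List String) (a : List Int), (∀ x ∈ a, 0 ≤ x) →
      ∀ x ∈ ws.foldl (fun a w => List.zipWith max a (pvCountWord w.toList)) a, 0 ≤ x by
    exact h demand _ (by intro x hx; simp at hx; omega)
  intro ws
  induction ws with
  | nil => intro a ha; simpa using ha
  | cons w ws ih =>
    intro a ha
    exact ih _ (pvZipmax_nonneg _ _ ha (pvCountWord_nonneg _))

theorem pvFoldl_zipmax (ys : List String) : ∀ (a : List Int), a.length = 26 → (∀ x ∈ a, 0 ≤ x) →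
    ys.foldl (fun a w => List.zipWith max a (pvCountWord w.toList)) a
      = List.zipWith max a (pvM ys) := by
  induction ys with
  | nil =>
    intro a ha hn
    unfold pvM
    simp only [List.foldl_nil]
    rw [show List.replicate 26 (0:Int) = List.replicate a.length 0 by rw [ha]]
    exact (pvZipmax_unit_right a hn).symm
  | cons w ws ih =>
    intro a ha hn
    simp only [List.foldl_cons]
    rw [ih _ (by simp [ha, pvCountWord_length]) (pvZipmax_nonneg _ _ hn (pvCountWord_nonneg _))]
    have h1 : pvM (w :: ws) = ws.foldl (fun a w => List.zipWith max a (pvCountWord w.toList))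
        (pvCountWord w.toList) := by
      unfold pvM
      simp only [List.foldl_cons]
      congr 1
      rw [show List.replicate 26 (0:Int) = List.replicate (pvCountWord w.toList).length 0 by
            rw [pvCountWord_length]]
      exact pvZipmax_unit_left _ (pvCountWord_nonneg _)
    have hw : pvM (w :: ws) = List.zipWith max (pvCountWord w.toList) (pvM ws) := by
      rw [h1, ih _ (pvCountWord_length _) (pvCountWord_nonneg _)]
    rw [hw, pvZipmax_assoc]

theorem pvM_append (xs ys : List String) :
    pvM (xs ++ ys) = List.zipWith max (pvM xs) (pvM ys) := by
  unfold pvM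
  rw [List.foldl_append]
  exact pvFoldl_zipmax ys _ (pvM_length xs) (pvM_nonneg xs)

-- B's recursive merge computes pvM on every nonempty list
theorem pvMaxTable_eq (l : List String) (hl : l ≠ []) : pvMaxTable l = pvM l := by
  induction l using pvMaxTable.induct with
  | case1 => exact absurd rfl hl
  | case2 w =>
    unfold pvMaxTable pvM
    simp only [List.foldl_cons, List.foldl_nil]
    rw [show List.replicate 26 (0:Int) = List.replicate (pvCountWord w.toList).length 0 by
          rw [pvCountWord_length],
        pvZipmax_unit_left _ (pvCountWord_nonneg _)]
  | case3 a b rest ih1 ih2 =>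
    rw [pvMaxTable]
    rw [ih1 (by simp [List.take_eq_nil_iff]),
        ih2 (by simp [List.drop_eq_nil_iff]; omega),
        ← pvM_append, List.take_append_drop]

-- ===== VERDICT (by name: the statement is the Claim_ definition above) =====
theorem minNumBooths_spec : Claim_equal_minNumBooths := by
  intro demand _ _
  unfold Spec_minNumBooths minNumBooths_alt
  rw [pvA_eq]
  by_cases h : demand = []
  · subst h; simp [pvM]
  · rw [if_neg h, pvMaxTable_eq demand h]
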